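-- pv_equiv track=rewrite | github.com/lovepythonn/PythonProject | functions.py | comp_colors
-- ===== SOURCE A (Python) =====
-- def comp_colors(input_list,check_list,return_list):
--     """comp_colors is a function that takes in a common color
--     it returns its complementary color
--     """
--     output=None
--     for i in input_list:
--         if "red" in input_list and check_list:
--             output=return_list[1]
--             break
--         elif "green" in input_list and check_list:
--             output=return_list[2]
--             break
--         elif "orange" in input_list and check_list:
--             output=return_list[3]
--             break
--         elif "blue" in input_list and check_list:
--             output=return_list[4]
--             break
--         elif "yellow" in input_list and check_list:
--             output=return_list[5]
--             break
--         elif "purple" in input_list and check_list: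
--             output=return_list[6]
--             break
--     return output
-- ===== SOURCE B (Python) =====
-- _IDX = {"red": 1, "green": 2, "orange": 3, "blue": 4, "yellow": 5, "purple": 6}
--
--
-- def comp_colors(input_list, check_list, return_list):
--     if not input_list or not check_list:
--         return None
--     best = None
--     for c in input_list:
--         i = _IDX.get(c)
--         if i is not None and (best is None or i < best):
--             best = i
--     return None if best is None else return_list[best]
-- ===== Notes on version B (the rewrite author's own statement) =====
-- stated objective: faster
-- what changed: Instead of A's loop over input_list repeating an unrolled six-branch membership-test chain on every iteration, B makes one pass over input_list mapping each element to a priority index through a dict and keeping the minimum index seen, then indexes return_list once; correct because A's red..purple branch order coincides with increasing indices 1..6, so the first branch that fires is exactly the minimum index present.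
-- outside the precondition, e.g. on comp_colors(['red'], ['x'], []): A raises IndexError, B raises IndexError
import Mathlib
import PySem

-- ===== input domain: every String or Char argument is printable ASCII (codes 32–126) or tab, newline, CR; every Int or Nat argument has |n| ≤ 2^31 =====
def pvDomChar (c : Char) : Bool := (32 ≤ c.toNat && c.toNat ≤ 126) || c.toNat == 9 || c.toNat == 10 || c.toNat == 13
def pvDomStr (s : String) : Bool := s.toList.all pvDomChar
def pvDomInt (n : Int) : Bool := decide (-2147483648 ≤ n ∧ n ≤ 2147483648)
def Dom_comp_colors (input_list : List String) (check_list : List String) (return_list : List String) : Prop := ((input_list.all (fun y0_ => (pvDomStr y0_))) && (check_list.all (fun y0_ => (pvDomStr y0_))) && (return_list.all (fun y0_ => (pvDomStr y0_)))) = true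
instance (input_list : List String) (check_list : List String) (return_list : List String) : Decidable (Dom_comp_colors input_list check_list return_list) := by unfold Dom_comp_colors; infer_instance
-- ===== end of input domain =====

-- B replaces A's loop repeating a six-way membership-test chain by one pass over
-- input_list keeping the minimum priority index found via a dict (objective: faster).

-- ===== PORT A =====
-- the 'for i in input_list' loop; the branch conditions never mention i, as in A
def compA_loop (input_list : List String) (check_list : List String) (return_list : List String) : List String → Option String
  | [] => none
  | _ :: rest =>
    if "red" ∈ input_list ∧ check_list ≠ [] then PySem.List.pyGet? return_list 1
    else if "green" ∈ input_list ∧ check_list ≠ [] then PySem.List.pyGet? return_list 2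
    else if "orange" ∈ input_list ∧ check_list ≠ [] then PySem.List.pyGet? return_list 3
    else if "blue" ∈ input_list ∧ check_list ≠ [] then PySem.List.pyGet? return_list 4
    else if "yellow" ∈ input_list ∧ check_list ≠ [] then PySem.List.pyGet? return_list 5
    else if "purple" ∈ input_list ∧ check_list ≠ [] then PySem.List.pyGet? return_list 6
    else compA_loop input_list check_list return_list rest

def comp_colors (input_list : List String) (check_list : List String) (return_list : List String) : Option String :=
  compA_loop input_list check_list return_list input_list

-- ===== PORT B =====
-- the _IDX dict of Source B
def compB_idx : PySem.Dict String Int :=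
  PySem.Dict.ofList [("red", 1), ("green", 2), ("orange", 3), ("blue", 4), ("yellow", 5), ("purple", 6)]

-- one iteration of Source B's 'for c in input_list' min-accumulator loop
def compB_step (best : Option Int) (c : String) : Option Int :=
  match PySem.Dict.get? compB_idx c with
  | none => best
  | some i =>
    match best with
    | none => some i
    | some b => if i < b then some i else some b

def comp_colors_alt (input_list : List String) (check_list : List String) (return_list : List String) : Option String :=
  if input_list = [] ∨ check_list = [] then none
  else
    match input_list.foldl compB_step none with
    | none => none
    | some b => PySem.List.pyGet? return_list b

-- ===== PRECONDITION & SPEC =====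
-- Pre_ excludes exactly the inputs on which Python A raises IndexError: a color matches
-- (with both lists truthy) but return_list is too short for that color's index.
def Pre_comp_colors (input_list : List String) (check_list : List String) (return_list : List String) : Prop :=
  input_list = [] ∨ check_list = [] ∨
  (if "red" ∈ input_list then 2 ≤ return_list.length
   else if "green" ∈ input_list then 3 ≤ return_list.length
   else if "orange" ∈ input_list then 4 ≤ return_list.length
   else if "blue" ∈ input_list then 5 ≤ return_list.length
   else if "yellow" ∈ input_list then 6 ≤ return_list.length
   else if "purple" ∈ input_list then 7 ≤ return_list.length
   else True)
instance (input_list : List String) (check_list : List String) (return_list : List String) : Decidable (Pre_comp_colors input_list check_list return_list) := by unfold Pre_comp_colors; infer_instance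

def pvWitness_comp_colors : List String × List String × List String :=
  (["red"], ["x"], ["a", "b"])

def Spec_comp_colors (input_list : List String) (check_list : List String) (return_list : List String) (out : Option String) : Prop := out = comp_colors_alt input_list check_list return_list
instance (input_list : List String) (check_list : List String) (return_list : List String) (out : Option String) : Decidable (Spec_comp_colors input_list check_list return_list out) := by unfold Spec_comp_colors; infer_instance

-- ===== CLAIM (what is proved, stated in full; the proofs are below) =====
def Claim_equal_comp_colors : Prop := ∀ (input_list : List String) (check_list : List String) (return_list : List String), Dom_comp_colors input_list check_list return_list → Pre_comp_colors input_list check_list return_list → Spec_comp_colors input_list check_list return_list (comp_colors input_list check_list return_list)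

-- ===== LEMMAS AND PROOFS =====
-- the index A's branch chain selects, as a function of the memberships alone
def chainIdx (l : List String) : Option Int :=
  if "red" ∈ l then some 1
  else if "green" ∈ l then some 2
  else if "orange" ∈ l then some 3
  else if "blue" ∈ l then some 4
  else if "yellow" ∈ l then some 5
  else if "purple" ∈ l then some 6
  else none

-- min-merge of optional indices
def omin : Option Int → Option Int → Option Int
  | none, y => y
  | some b, none => some b
  | some b, some i => if i < b then some i else some b

theorem compB_idx_mk : compB_idx = PySem.Dict.mk
    [("red", 1), ("green", 2), ("orange", 3), ("blue", 4), ("yellow", 5), ("purple", 6)] := by decide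

-- A's priority order red..purple coincides with increasing indices 1..6, so prepending
-- one element min-merges its dict index into the chain's choice
theorem chainIdx_cons (c : String) (l : List String) :
    chainIdx (c :: l) = omin (PySem.Dict.get? compB_idx c) (chainIdx l) := by
  by_cases h1 : c = "red"
  · subst h1
    rw [show PySem.Dict.get? compB_idx "red" = some 1 from rfl]
    simp only [chainIdx, List.mem_cons, String.reduceEq, false_or, true_or, if_true]
    split_ifs <;> simp [omin]
  by_cases h2 : c = "green"
  · subst h2
    rw [show PySem.Dict.get? compB_idx "green" = some 2 from rfl]
    simp only [chainIdx, List.mem_cons, String.reduceEq, false_or, true_or, if_true]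
    split_ifs <;> simp [omin]
  by_cases h3 : c = "orange"
  · subst h3
    rw [show PySem.Dict.get? compB_idx "orange" = some 3 from rfl]
    simp only [chainIdx, List.mem_cons, String.reduceEq, false_or, true_or, if_true]
    split_ifs <;> simp [omin]
  by_cases h4 : c = "blue"
  · subst h4
    rw [show PySem.Dict.get? compB_idx "blue" = some 4 from rfl]
    simp only [chainIdx, List.mem_cons, String.reduceEq, false_or, true_or, if_true]
    split_ifs <;> simp [omin]
  by_cases h5 : c = "yellow"
  · subst h5
    rw [show PySem.Dict.get? compB_idx "yellow" = some 5 from rfl]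
    simp only [chainIdx, List.mem_cons, String.reduceEq, false_or, true_or, if_true]
    split_ifs <;> simp [omin]
  by_cases h6 : c = "purple"
  · subst h6
    rw [show PySem.Dict.get? compB_idx "purple" = some 6 from rfl]
    simp only [chainIdx, List.mem_cons, String.reduceEq, false_or, true_or, if_true]
    split_ifs <;> simp [omin]
  · have hg : PySem.Dict.get? compB_idx c = none := by
      simp [compB_idx_mk, beq_iff_eq, Ne.symm h1, Ne.symm h2, Ne.symm h3,
        Ne.symm h4, Ne.symm h5, Ne.symm h6, PySem.Dict.get?]
    rw [hg]
    simp only [chainIdx, List.mem_cons, Ne.symm h1, Ne.symm h2, Ne.symm h3,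
      Ne.symm h4, Ne.symm h5, Ne.symm h6, false_or]
    split_ifs <;> simp [omin]

theorem step_eq_omin (best : Option Int) (c : String) :
    compB_step best c = omin best (PySem.Dict.get? compB_idx c) := by
  unfold compB_step
  cases h : PySem.Dict.get? compB_idx c <;> cases best <;> simp [omin]

theorem omin_none_left (y : Option Int) : omin none y = y := rfl

theorem omin_none_right (x : Option Int) : omin x none = x := by cases x <;> rfl

theorem omin_some (b i : Int) : omin (some b) (some i) = some (min b i) := by
  simp only [omin, min_def]
  split_ifs <;> simp only [Option.some.injEq] <;> omega

theorem omin_assoc (x y z : Option Int) : omin (omin x y) z = omin x (omin y z) := by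
  cases x <;> cases y <;> cases z <;>
    simp only [omin_none_left, omin_none_right, omin_some, min_assoc]

theorem foldl_step_eq (l : List String) :
    ∀ acc : Option Int, l.foldl compB_step acc = omin acc (chainIdx l) := by
  induction l with
  | nil => intro acc; cases acc <;> simp [chainIdx, omin]
  | cons c rest ih =>
    intro acc
    rw [List.foldl_cons, ih, step_eq_omin, chainIdx_cons, omin_assoc]

-- A's if-chain, lifted out of the loop (the conditions never depend on the loop variable)
def compA_chain (input_list : List String) (check_list : List String) (return_list : List String) : Option String :=
  if "red" ∈ input_list ∧ check_list ≠ [] then PySem.List.pyGet? return_list 1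
  else if "green" ∈ input_list ∧ check_list ≠ [] then PySem.List.pyGet? return_list 2
  else if "orange" ∈ input_list ∧ check_list ≠ [] then PySem.List.pyGet? return_list 3
  else if "blue" ∈ input_list ∧ check_list ≠ [] then PySem.List.pyGet? return_list 4
  else if "yellow" ∈ input_list ∧ check_list ≠ [] then PySem.List.pyGet? return_list 5
  else if "purple" ∈ input_list ∧ check_list ≠ [] then PySem.List.pyGet? return_list 6
  else none

theorem compA_loop_eq (input_list check_list return_list : List String) :
    ∀ l : List String, compA_loop input_list check_list return_list l =
      if l = [] then none else compA_chain input_list check_list return_list := by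
  intro l
  induction l with
  | nil => rfl
  | cons x rest ih =>
    simp only [compA_loop, compA_chain] at *
    split_ifs at * <;> simp_all

theorem compA_chain_eq_chainIdx (input_list check_list return_list : List String)
    (h : check_list ≠ []) :
    compA_chain input_list check_list return_list =
      (match chainIdx input_list with
       | none => none
       | some b => PySem.List.pyGet? return_list b) := by
  unfold compA_chain chainIdx
  simp only [ne_eq, h, not_false_eq_true, and_true]
  split_ifs <;> rfl

theorem comp_colors_spec : Claim_equal_comp_colors := by
  intro input_list check_list return_list _ _
  unfold Spec_comp_colors comp_colors comp_colors_alt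
  rw [compA_loop_eq, foldl_step_eq]
  by_cases hi : input_list = []
  · simp [hi]
  · by_cases hc : check_list = []
    · simp [hi, hc, compA_chain]
    · simp only [hi, hc, or_self, if_false]
      rw [compA_chain_eq_chainIdx _ _ _ hc]
      cases chainIdx input_list <;> simp [omin]
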